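-- pv_equiv track=rewrite | github.com/Moxx-Company/Nomadly2 | telegram_compatibility_optimizer.py | optimize_keyboard_layout
-- ===== SOURCE A (Python) =====
-- from typing import Dict, List, Tuple
--
-- def optimize_keyboard_layout(buttons: List[Tuple[str, str]], platform="mobile") -> List[List[Tuple[str, str]]]:
--     """Optimize keyboard layout for specific platform"""
--     if platform == "mobile":
--         # Mobile: Prefer vertical single-column layout
--         return [[button] for button in buttons]
--     elif platform == "desktop":
--         # Desktop: Can handle wider layouts
--         rows = []
--         for i in range(0, len(buttons), 2):
--             row = buttons[i:i+2]
--             rows.append(row)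
--         return rows
--     else:  # web
--         # Web: Conservative approach, pairs work well
--         rows = []
--         for i in range(0, len(buttons), 2):
--             row = buttons[i:i+2]
--             rows.append(row)
--         return rows
-- ===== SOURCE B (Python) =====
-- def optimize_keyboard_layout(buttons, platform="mobile"):
--     """Optimize keyboard layout for specific platform"""
--     row_size = 1 if platform == "mobile" else 2
--     rows = []
--     current = []
--     for button in buttons:
--         current.append(button)
--         if len(current) == row_size:
--             rows.append(current)
--             current = []
--     if current:
--         rows.append(current)
--     return rows
-- ===== Notes on version B (the rewrite author's own statement) =====
-- stated objective: simpler
-- what changed: Replaces the three platform branches (a list comprehension plus two identical index/slice loops) with one parameterized single pass: row_size computed once, buttons accumulated into a current row that is flushed when full, with a trailing partial row appended at the end.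
import Mathlib
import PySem

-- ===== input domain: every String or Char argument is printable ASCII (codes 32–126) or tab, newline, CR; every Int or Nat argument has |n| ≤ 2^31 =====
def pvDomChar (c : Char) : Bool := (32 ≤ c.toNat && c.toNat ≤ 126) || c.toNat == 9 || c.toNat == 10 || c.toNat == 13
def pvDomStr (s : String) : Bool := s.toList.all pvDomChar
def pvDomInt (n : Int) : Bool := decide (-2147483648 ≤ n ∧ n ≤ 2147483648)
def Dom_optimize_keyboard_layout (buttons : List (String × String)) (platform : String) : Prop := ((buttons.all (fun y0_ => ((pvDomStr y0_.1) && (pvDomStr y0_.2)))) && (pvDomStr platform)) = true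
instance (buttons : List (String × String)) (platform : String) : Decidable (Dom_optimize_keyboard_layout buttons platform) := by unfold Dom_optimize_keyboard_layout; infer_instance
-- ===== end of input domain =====

-- B changes only the decomposition (one parameterized accumulating pass instead of three branches with slicing); same values, same cost.

-- ===== PORT A =====
def optimize_keyboard_layout (buttons : List (String × String)) (platform : String) : List (List (String × String)) :=
  if platform == "mobile" then
    buttons.map (fun button => [button])
  else if platform == "desktop" then
    (PySem.List.pyRange 0 (buttons.length : Int) 2).foldl
      (fun rows i => rows ++ [PySem.List.slice buttons (some i) (some (i + 2))]) []
  else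
    (PySem.List.pyRange 0 (buttons.length : Int) 2).foldl
      (fun rows i => rows ++ [PySem.List.slice buttons (some i) (some (i + 2))]) []

-- ===== PORT B =====
-- one loop-body step of Source B's for-loop (append to current, flush when full)
def pvStep (row_size : Nat)
    (acc : List (List (String × String)) × List (String × String))
    (button : String × String) :
    List (List (String × String)) × List (String × String) :=
  let current := acc.2 ++ [button]
  if current.length == row_size then (acc.1 ++ [current], []) else (acc.1, current)

def optimize_keyboard_layout_alt (buttons : List (String × String)) (platform : String) : List (List (String × String)) :=
  let row_size : Nat := if platform == "mobile" then 1 else 2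
  let st := buttons.foldl (pvStep row_size) ([], [])
  if st.2 ≠ [] then st.1 ++ [st.2] else st.1

-- ===== PRECONDITION & SPEC =====
def Spec_optimize_keyboard_layout (buttons : List (String × String)) (platform : String) (out : List (List (String × String))) : Prop := out = optimize_keyboard_layout_alt buttons platform
instance (buttons : List (String × String)) (platform : String) (out : List (List (String × String))) : Decidable (Spec_optimize_keyboard_layout buttons platform out) := by unfold Spec_optimize_keyboard_layout; infer_instance

-- ===== CLAIM (what is proved, stated in full; the proofs are below) =====
def Claim_equal_optimize_keyboard_layout : Prop := ∀ (buttons : List (String × String)) (platform : String), Dom_optimize_keyboard_layout buttons platform → Spec_optimize_keyboard_layout buttons platform (optimize_keyboard_layout buttons platform)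

-- ===== LEMMAS AND PROOFS =====

-- Reference chunking into pairs; A's else-branch loop and B's row_size-2 loop are both proved equal to it.
def chunk2 {α : Type} : List α → List (List α)
  | [] => []
  | [a] => [[a]]
  | a :: b :: t => [a, b] :: chunk2 t

theorem chunk2_eq_cons {α : Type} (l : List α) (h : l ≠ []) :
    chunk2 l = l.take 2 :: chunk2 (l.drop 2) := by
  match l with
  | [] => exact absurd rfl h
  | [a] => rfl
  | a :: b :: t => rfl

theorem pyRange_two_nil (a b : Int) (h : b ≤ a) :
    PySem.List.pyRange a b 2 = [] := by
  rw [PySem.List.pyRange_of_pos a b (by norm_num), if_neg (by omega)]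
  simp

theorem pyRange_two_cons (a b : Int) (h : a < b) :
    PySem.List.pyRange a b 2 = a :: PySem.List.pyRange (a + 2) b 2 := by
  rw [PySem.List.pyRange_of_pos a b (by norm_num),
      PySem.List.pyRange_of_pos (a + 2) b (by norm_num)]
  have key : (if a < b then ((b - a + 2 - 1) / 2).toNat else 0)
      = (if a + 2 < b then ((b - (a + 2) + 2 - 1) / 2).toNat else 0) + 1 := by
    rw [if_pos h]; split_ifs with h2 <;> omega
  rw [key, List.range_succ_eq_map, List.map_cons, List.map_map]
  refine congrArg₂ _ (by simp) ?_
  refine List.map_congr_left ?_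
  intro k _
  simp [Function.comp]
  ring

theorem aloop_eq (buttons : List (String × String)) :
    ∀ (n j : Nat) (rows : List (List (String × String))), buttons.length - j ≤ n →
    (PySem.List.pyRange (j : Int) (buttons.length : Int) 2).foldl
      (fun rows i => rows ++ [PySem.List.slice buttons (some i) (some (i + 2))]) rows
    = rows ++ chunk2 (buttons.drop j) := by
  intro n
  induction n with
  | zero =>
    intro j rows h
    rw [pyRange_two_nil _ _ (by exact_mod_cast (by omega : buttons.length ≤ j))]
    rw [List.drop_eq_nil_of_le (by omega)]
    simp [chunk2]
  | succ n ih =>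
    intro j rows h
    by_cases hj : j < buttons.length
    · rw [pyRange_two_cons _ _ (by exact_mod_cast hj), List.foldl_cons]
      have hs : PySem.List.slice buttons (some (j : Int)) (some ((j : Int) + 2))
          = (buttons.drop j).take 2 := by
        simpa using PySem.List.slice_natCast_add buttons j 2
      have hcast : ((j : Int) + 2) = ((j + 2 : Nat) : Int) := by push_cast; ring
      rw [hs, hcast, ih (j + 2) _ (by omega)]
      rw [chunk2_eq_cons (buttons.drop j) (by
        intro hnil
        have := List.drop_eq_nil_iff.mp hnil
        omega)]
      rw [List.drop_drop]
      simp
    · rw [pyRange_two_nil _ _ (by exact_mod_cast (by omega : buttons.length ≤ j))]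
      rw [List.drop_eq_nil_of_le (by omega)]
      simp [chunk2]

theorem bloop_pairs (bs : List (String × String)) :
    ∀ (rows : List (List (String × String))),
    (let st := bs.foldl (pvStep 2) (rows, [])
     if st.2 ≠ [] then st.1 ++ [st.2] else st.1)
    = rows ++ chunk2 bs := by
  induction bs using chunk2.induct with
  | case1 => intro rows; simp [chunk2]
  | case2 a => intro rows; simp [chunk2, pvStep]
  | case3 a b t ih =>
    intro rows
    have := ih (rows ++ [[a, b]])
    simpa [chunk2, pvStep] using this

theorem bloop_singles (bs : List (String × String)) :
    ∀ (rows : List (List (String × String))),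
    bs.foldl (pvStep 1) (rows, []) = (rows ++ bs.map (fun b => [b]), []) := by
  induction bs with
  | nil => intro rows; simp
  | cons a t ih =>
    intro rows
    have := ih (rows ++ [[a]])
    simpa [pvStep] using this

-- ===== VERDICT (by name: the statement is the Claim_ definition above) =====
theorem optimize_keyboard_layout_spec : Claim_equal_optimize_keyboard_layout := by
  intro buttons platform _
  unfold Spec_optimize_keyboard_layout optimize_keyboard_layout optimize_keyboard_layout_alt
  by_cases hm : platform == "mobile"
  · simp only [hm, if_true, bloop_singles buttons []]
    simp
  · have hb := bloop_pairs buttons []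
    have ha := aloop_eq buttons buttons.length 0 [] (by omega)
    simp only [List.drop_zero, Nat.cast_zero, List.nil_append] at ha hb
    simp only [hm, Bool.false_eq_true, if_false]
    by_cases hd : platform == "desktop" <;> simp only [hd, if_true, Bool.false_eq_true, if_false] <;>
      rw [ha, ← hb]
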